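-- pv_equiv track=rewrite | github.com/djgroen/flee | archive/development/superseded_versions/standard_s1s2_diagnostic_suite.py | _group_activation_by_connectivity
-- ===== SOURCE A (Python) =====
-- from typing import Dict, List, Any, Tuple, Optional
--
-- def _group_activation_by_connectivity(decisions: List[Dict]) -> Dict[int, Dict[str, int]]:
--     """Group cognitive activation by agent connectivity"""
--     by_connectivity = {}
--     for decision in decisions:
--         connectivity = decision.get('agent_connectivity', 0)
--         if connectivity not in by_connectivity:
--             by_connectivity[connectivity] = {'s1': 0, 's2': 0}
--
--         if decision.get('system2_active', False):
--             by_connectivity[connectivity]['s2'] += 1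
--         else:
--             by_connectivity[connectivity]['s1'] += 1
--
--     return by_connectivity
-- ===== SOURCE B (Python) =====
-- def _group_activation_by_connectivity(decisions):
--     """Group cognitive activation by agent connectivity (map-then-count)."""
--     keys = [(d.get('agent_connectivity', 0), bool(d.get('system2_active', False)))
--             for d in decisions]
--     return {c: {'s1': keys.count((c, False)), 's2': keys.count((c, True))}
--             for c in dict.fromkeys(c for c, _ in keys)}
-- ===== Notes on version B (the rewrite author's own statement) =====
-- stated objective: alternative
-- what changed: A builds nested per-connectivity buckets incrementally while looping over decisions; B keeps no accumulator at all: it first maps decisions to a list of (connectivity, s2-active) keys, then for each first-seen distinct connectivity counts matching keys with list.count in separate scans.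
import Mathlib
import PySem

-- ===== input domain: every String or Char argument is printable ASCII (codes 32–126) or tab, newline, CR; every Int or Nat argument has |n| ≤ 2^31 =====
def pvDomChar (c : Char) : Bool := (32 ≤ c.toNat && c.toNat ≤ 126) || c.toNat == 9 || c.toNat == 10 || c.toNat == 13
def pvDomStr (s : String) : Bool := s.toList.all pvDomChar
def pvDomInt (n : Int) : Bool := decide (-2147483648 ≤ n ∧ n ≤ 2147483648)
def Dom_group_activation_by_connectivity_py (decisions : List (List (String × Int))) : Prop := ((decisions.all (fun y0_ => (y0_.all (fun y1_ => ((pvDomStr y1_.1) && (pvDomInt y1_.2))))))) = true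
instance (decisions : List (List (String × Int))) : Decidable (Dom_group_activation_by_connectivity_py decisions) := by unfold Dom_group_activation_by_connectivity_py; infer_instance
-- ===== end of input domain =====

-- B replaces A's incremental nested-bucket accumulator loop by a map-then-count scheme:
-- it keeps no accumulator at all — it maps decisions to a list of (connectivity, s2-active)
-- keys and then counts matches per first-seen distinct connectivity with list.count
-- (objective: alternative decomposition, not faster).

-- ===== PORT A =====
-- literal port of A; the inner `by_connectivity[connectivity][f] += 1` (key always present
-- when reached) is ported as Dict.modify with an irrelevant default
def group_activation_by_connectivity_py (decisions : List (List (String × Int))) : List (Int × List (String × Int)) :=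
  let by_connectivity : PySem.Dict Int (PySem.Dict String Int) :=
    decisions.foldl (fun by_connectivity decision =>
      let connectivity := (PySem.Dict.mk decision).getD "agent_connectivity" 0
      let by_connectivity :=
        if by_connectivity.contains connectivity then by_connectivity
        else by_connectivity.insert connectivity (PySem.Dict.mk [("s1", 0), ("s2", 0)])
      if (PySem.Dict.mk decision).getD "system2_active" 0 ≠ 0 then
        by_connectivity.modify connectivity PySem.Dict.empty (fun inner => inner.modify "s2" 0 (· + 1))
      else
        by_connectivity.modify connectivity PySem.Dict.empty (fun inner => inner.modify "s1" 0 (· + 1)))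
      PySem.Dict.empty
  by_connectivity.items.map (fun p => (p.1, p.2.items))

-- ===== PORT B =====
-- dict.fromkeys(...) keeps first occurrences in order = PySem.List.dedup;
-- keys.count(...) = PySem.List.count
def group_activation_by_connectivity_py_alt (decisions : List (List (String × Int))) : List (Int × List (String × Int)) :=
  let keys : List (Int × Bool) :=
    decisions.map (fun d => ((PySem.Dict.mk d).getD "agent_connectivity" 0,
                             decide ((PySem.Dict.mk d).getD "system2_active" 0 ≠ 0)))
  (PySem.List.dedup (keys.map Prod.fst)).map (fun c =>
    (c, [("s1", (PySem.List.count keys (c, false) : Int)),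
         ("s2", (PySem.List.count keys (c, true) : Int))]))

-- ===== PRECONDITION & SPEC =====
def Spec_group_activation_by_connectivity_py (decisions : List (List (String × Int))) (out : List (Int × List (String × Int))) : Prop := out = group_activation_by_connectivity_py_alt decisions
instance (decisions : List (List (String × Int))) (out : List (Int × List (String × Int))) : Decidable (Spec_group_activation_by_connectivity_py decisions out) := by unfold Spec_group_activation_by_connectivity_py; infer_instance

-- ===== CLAIM (what is proved, stated in full; the proofs are below) =====
def Claim_equal_group_activation_by_connectivity_py : Prop := ∀ (decisions : List (List (String × Int))), Dom_group_activation_by_connectivity_py decisions → Spec_group_activation_by_connectivity_py decisions (group_activation_by_connectivity_py decisions)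

-- ===== LEMMAS AND PROOFS =====

-- A's loop body
def pvStepA (s : PySem.Dict Int (PySem.Dict String Int)) (decision : List (String × Int)) :
    PySem.Dict Int (PySem.Dict String Int) :=
  let connectivity := (PySem.Dict.mk decision).getD "agent_connectivity" 0
  let s :=
    if s.contains connectivity then s
    else s.insert connectivity (PySem.Dict.mk [("s1", 0), ("s2", 0)])
  if (PySem.Dict.mk decision).getD "system2_active" 0 ≠ 0 then
    s.modify connectivity PySem.Dict.empty (fun inner => inner.modify "s2" 0 (· + 1))
  else
    s.modify connectivity PySem.Dict.empty (fun inner => inner.modify "s1" 0 (· + 1))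

-- the (connectivity, s2-active) key B extracts from a decision
def pvKey (d : List (String × Int)) : Int × Bool :=
  ((PySem.Dict.mk d).getD "agent_connectivity" 0,
   decide ((PySem.Dict.mk d).getD "system2_active" 0 ≠ 0))

-- the inner dict for connectivity c, read off the key list by counting
def pvInner (ks : List (Int × Bool)) (c : Int) : PySem.Dict String Int :=
  PySem.Dict.mk [("s1", (ks.count (c, false) : Int)), ("s2", (ks.count (c, true) : Int))]

-- loop invariant: after A has processed the decisions whose keys are ks,
-- its dict has the first-seen connectivities as keys and counting buckets as values
def pvInv (s : PySem.Dict Int (PySem.Dict String Int)) (ks : List (Int × Bool)) : Prop :=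
  s.keys = PySem.Set.ofList (ks.map Prod.fst) ∧
  ∀ c ∈ s.keys, s.getD c PySem.Dict.empty = pvInner ks c

lemma pvInner_bump (ks : List (Int × Bool)) (c : Int) (f : Bool) :
    (pvInner ks c).modify (if f then "s2" else "s1") 0 (· + 1) = pvInner (ks ++ [(c, f)]) c := by
  cases f <;> simp [pvInner, List.count_append] <;> rfl

lemma pvInner_append_ne (ks : List (Int × Bool)) (c c' : Int) (f : Bool) (h : c' ≠ c) :
    pvInner (ks ++ [(c, f)]) c' = pvInner ks c' := by
  simp [pvInner, List.count_append, List.count_singleton, Prod.ext_iff]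
  exact ⟨fun hq => absurd hq.symm h, fun hq => absurd hq.symm h⟩

lemma pvInv_step' (c : Int) (f : Bool) (s : PySem.Dict Int (PySem.Dict String Int))
    (ks : List (Int × Bool)) (h : pvInv s ks) :
    pvInv ((if s.contains c then s else s.insert c (PySem.Dict.mk [("s1", 0), ("s2", 0)])).modify c
             PySem.Dict.empty (fun inner => inner.modify (if f then "s2" else "s1") 0 (· + 1)))
          (ks ++ [(c, f)]) := by
  obtain ⟨h1, h2⟩ := h
  have hofl : PySem.Set.ofList ((ks ++ [(c, f)]).map Prod.fst)
      = PySem.Set.add (PySem.Set.ofList (ks.map Prod.fst)) c := by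
    simp [PySem.Set.ofList_append_singleton]
  by_cases hm : c ∈ s.keys
  · have hct : s.contains c = true := (PySem.Dict.contains_iff_mem_keys s c).2 hm
    have hcs : PySem.Set.contains (PySem.Set.ofList (ks.map Prod.fst)) c = true := by
      rw [PySem.Set.contains_iff]; exact h1 ▸ hm
    rw [if_pos hct]
    constructor
    · rw [PySem.Dict.keys_modify, PySem.Dict.keys_insert_of_contains _ _ hct, h1, hofl,
        PySem.Set.add, if_pos hcs]
    · intro c' hc'
      rw [PySem.Dict.keys_modify, PySem.Dict.keys_insert_of_contains _ _ hct] at hc'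
      rw [PySem.Dict.getD_modify]
      by_cases hcc : c' = c
      · subst hcc
        rw [if_pos rfl, h2 c' hc', pvInner_bump]
      · rw [if_neg hcc, h2 c' hc', pvInner_append_ne ks c c' f hcc]
  · have hct : s.contains c = false := by
      rw [← Bool.not_eq_true]; intro hq
      exact hm ((PySem.Dict.contains_iff_mem_keys s c).1 hq)
    rw [if_neg (by simp [hct])]
    have hkeys1 : (s.insert c (PySem.Dict.mk [("s1", 0), ("s2", 0)])).keys = s.keys ++ [c] :=
      PySem.Dict.keys_insert_of_not_contains _ _ hct
    have hcount0 : ∀ b : Bool, ks.count (c, b) = 0 := by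
      intro b
      rw [List.count_eq_zero]
      intro hq
      exact hm (h1 ▸ (PySem.Set.mem_ofList _ _).2 (List.mem_map.2 ⟨(c, b), hq, rfl⟩))
    have hcs : ¬ PySem.Set.contains (PySem.Set.ofList (ks.map Prod.fst)) c = true := by
      rw [PySem.Set.contains_iff]; exact fun hq => hm (h1 ▸ hq)
    constructor
    · rw [PySem.Dict.keys_modify,
        PySem.Dict.keys_insert_of_contains _ _ (PySem.Dict.contains_insert_self ..), hkeys1, hofl,
        h1, PySem.Set.add, if_neg hcs]
    · intro c' hc'
      rw [PySem.Dict.keys_modify,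
        PySem.Dict.keys_insert_of_contains _ _ (PySem.Dict.contains_insert_self ..), hkeys1] at hc'
      rw [PySem.Dict.getD_modify]
      by_cases hcc : c' = c
      · subst hcc
        rw [if_pos rfl, PySem.Dict.getD_insert_self]
        have h0 : PySem.Dict.mk [("s1", (0:Int)), ("s2", (0:Int))] = pvInner ks c' := by
          simp [pvInner, hcount0]
        rw [h0, pvInner_bump]
      · have hc2 : c' ∈ s.keys := by
          rcases List.mem_append.1 hc' with h | h
          · exact h
          · exact absurd (List.mem_singleton.1 h) hcc
        rw [if_neg hcc, PySem.Dict.getD_insert, if_neg hcc, h2 c' hc2,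
          pvInner_append_ne ks c c' f hcc]

lemma pvInv_fold (decisions : List (List (String × Int)))
    (s : PySem.Dict Int (PySem.Dict String Int)) (ks : List (Int × Bool)) (h : pvInv s ks) :
    pvInv (decisions.foldl pvStepA s) (ks ++ decisions.map pvKey) := by
  induction decisions generalizing s ks with
  | nil => simpa using h
  | cons d ds ih =>
    have hstep : pvInv (pvStepA s d) (ks ++ [pvKey d]) := by
      have := pvInv_step' (pvKey d).1 (pvKey d).2 s ks h
      by_cases hsys : (PySem.Dict.mk d).getD "system2_active" 0 ≠ 0
      · simpa [pvStepA, pvKey, hsys] using this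
      · simpa [pvStepA, pvKey, hsys] using this
    simpa [List.append_assoc] using ih _ _ hstep

-- ===== VERDICT (by name: the statement is the Claim_ definition above) =====
theorem group_activation_by_connectivity_py_spec : Claim_equal_group_activation_by_connectivity_py := by
  intro decisions _
  unfold Spec_group_activation_by_connectivity_py
  unfold group_activation_by_connectivity_py group_activation_by_connectivity_py_alt
  rw [show (fun (by_connectivity : PySem.Dict Int (PySem.Dict String Int)) decision =>
        let connectivity := (PySem.Dict.mk decision).getD "agent_connectivity" 0
        let by_connectivity :=
          if by_connectivity.contains connectivity then by_connectivity
          else by_connectivity.insert connectivity (PySem.Dict.mk [("s1", 0), ("s2", 0)])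
        if (PySem.Dict.mk decision).getD "system2_active" 0 ≠ 0 then
          by_connectivity.modify connectivity PySem.Dict.empty (fun inner => inner.modify "s2" 0 (· + 1))
        else
          by_connectivity.modify connectivity PySem.Dict.empty (fun inner => inner.modify "s1" 0 (· + 1))) = pvStepA from rfl]
  have hfold := pvInv_fold decisions PySem.Dict.empty []
    ⟨by simp [PySem.Dict.keys_empty], by simp [PySem.Dict.keys_empty]⟩
  rw [List.nil_append] at hfold
  obtain ⟨h1, h2⟩ := hfold
  set S := decisions.foldl pvStepA PySem.Dict.empty with hS
  set ks := decisions.map pvKey with hks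
  have hnd : S.keys.Nodup := h1 ▸ PySem.Set.nodup_ofList _
  change List.map (fun p => (p.1, p.2.items)) S.items =
    List.map (fun c => (c, [("s1", ((PySem.List.count ks (c, false)) : Int)),
                            ("s2", ((PySem.List.count ks (c, true)) : Int))]))
      (PySem.List.dedup (List.map Prod.fst ks))
  rw [PySem.Dict.items_eq_map_keys S hnd PySem.Dict.empty, h1]
  simp only [PySem.List.dedup_eq_ofList, List.map_map]
  refine List.map_congr_left (fun c hc => ?_)
  have := h2 c (h1 ▸ hc)
  simp only [Function.comp, this, pvInner, PySem.List.count_eq]
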